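-- pv_equiv track=rewrite | github.com/akashsmaran/pdfrankerandsearcher | pdf/query_retrieve.py | dist_between
-- ===== SOURCE A (Python) =====
-- def dist_between(a, b, pos):
--     mini = 10000
--     lum = 0
--     mul = 0
--     for i in range(len(a)):
--         """lim = [[b[k] - a[i],a[i],b[k]] for k in range(len(b)) if(b[k] > a[i])]
--         mini = min(lim)
--         """
--         for k in range(len(b)):
--             if(a[i] < b[k] and b[k]-a[i] < mini):
--                 mini =  b[k] - a[i]
--                 lum = a[i]
--                 mul = b[k]
--     return [mini, lum, mul, pos]
-- ===== SOURCE B (Python) =====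
-- def dist_between(a, b, pos):
--     sb = sorted(b)
--     mini = 10000
--     lum = 0
--     mul = 0
--     for x in a:
--         # bisect_right(sb, x), hand-written since the module imports nothing
--         lo, hi = 0, len(sb)
--         while lo < hi:
--             mid = (lo + hi) // 2
--             if x < sb[mid]:
--                 hi = mid
--             else:
--                 lo = mid + 1
--         if lo < len(sb):
--             d = sb[lo] - x
--             if d < mini:
--                 mini = d
--                 lum = x
--                 mul = sb[lo]
--     return [mini, lum, mul, pos]
-- ===== Notes on version B (the rewrite author's own statement) =====
-- stated objective: faster
-- what changed: B sorts b once and, for each element of a, binary-searches (hand-written bisect_right) for the smallest element of b greater than it, instead of A's nested scan over all pairs.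
import Mathlib
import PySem

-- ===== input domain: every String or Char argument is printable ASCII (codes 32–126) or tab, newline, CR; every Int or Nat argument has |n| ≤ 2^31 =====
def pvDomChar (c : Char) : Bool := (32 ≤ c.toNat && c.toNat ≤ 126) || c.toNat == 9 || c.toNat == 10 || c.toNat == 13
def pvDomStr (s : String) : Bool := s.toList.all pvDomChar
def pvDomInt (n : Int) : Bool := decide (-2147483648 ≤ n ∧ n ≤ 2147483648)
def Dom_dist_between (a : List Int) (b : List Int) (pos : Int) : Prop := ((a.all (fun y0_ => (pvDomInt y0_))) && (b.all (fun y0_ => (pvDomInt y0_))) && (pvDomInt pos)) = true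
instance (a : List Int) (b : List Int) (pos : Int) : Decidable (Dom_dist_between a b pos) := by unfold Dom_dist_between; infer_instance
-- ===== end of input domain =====

-- B sorts b once and binary-searches per element of a instead of A's nested full scan; objective: faster.

-- ===== PORT A =====
def dist_between (a : List Int) (b : List Int) (pos : Int) : List Int :=
  -- mini = 10000; lum = 0; mul = 0; nested for-loops over range(len(a)) × range(len(b))
  let s := (PySem.List.pyRange 0 (PySem.List.len a) 1).foldl (fun s i =>
      (PySem.List.pyRange 0 (PySem.List.len b) 1).foldl (fun s k =>
        -- indices come from range(len(·)), so both accesses are in range; default never used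
        if PySem.List.pyGetD a i 0 < PySem.List.pyGetD b k 0 ∧
           PySem.List.pyGetD b k 0 - PySem.List.pyGetD a i 0 < s.1 then
          (PySem.List.pyGetD b k 0 - PySem.List.pyGetD a i 0,
           PySem.List.pyGetD a i 0, PySem.List.pyGetD b k 0)
        else s) s)
    ((10000 : Int), (0 : Int), (0 : Int))
  [s.1, s.2.1, s.2.2, pos]

-- ===== PORT B =====
def dist_between_alt (a : List Int) (b : List Int) (pos : Int) : List Int :=
  let sb := PySem.List.sorted b (fun y => y) false
  let s := a.foldl (fun s x =>
      -- Source B's hand-written while-loop IS the canonical bisect_right binary search;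
      -- PySem.List.bisectRight is literally that loop (lo/hi, mid = (lo+hi)//2)
      let lo := PySem.List.bisectRight sb x
      if (lo : Int) < PySem.List.len sb then
        -- lo < len(sb), so the index is in range; default never used
        if PySem.List.pyGetD sb (lo : Int) 0 - x < s.1 then
          (PySem.List.pyGetD sb (lo : Int) 0 - x, x, PySem.List.pyGetD sb (lo : Int) 0)
        else s
      else s)
    ((10000 : Int), (0 : Int), (0 : Int))
  [s.1, s.2.1, s.2.2, pos]

-- ===== PRECONDITION & SPEC =====
def Spec_dist_between (a : List Int) (b : List Int) (pos : Int) (out : List Int) : Prop := out = dist_between_alt a b pos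
instance (a : List Int) (b : List Int) (pos : Int) (out : List Int) : Decidable (Spec_dist_between a b pos out) := by unfold Spec_dist_between; infer_instance

-- ===== CLAIM (what is proved, stated in full; the proofs are below) =====
def Claim_equal_dist_between : Prop := ∀ (a : List Int) (b : List Int) (pos : Int), Dom_dist_between a b pos → Spec_dist_between a b pos (dist_between a b pos)

-- ===== LEMMAS AND PROOFS =====

-- A's inner-loop body, as a function of the current state and the scanned element of b
def pvStepA (x : Int) (s : Int × Int × Int) (y : Int) : Int × Int × Int :=
  if x < y ∧ y - x < s.1 then (y - x, x, y) else s

-- the common abstract step: update the state with the least element of b greater than x (if any)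
def pvApp (x : Int) (m? : Option Int) (s : Int × Int × Int) : Int × Int × Int :=
  match m? with
  | none => s
  | some m => if m - x < s.1 then (m - x, x, m) else s

-- least element of l strictly greater than x
def pvMinGT (x : Int) : List Int → Option Int
  | [] => none
  | y :: l => if x < y then some ((pvMinGT x l).elim y (min y)) else pvMinGT x l

theorem pvMinGT_none_iff (x : Int) (l : List Int) :
    pvMinGT x l = none ↔ ∀ y ∈ l, ¬ x < y := by
  induction l with
  | nil => simp [pvMinGT]
  | cons y l ih =>
    by_cases h : x < y
    · simp [pvMinGT, h]
    · simp [pvMinGT, h, ih]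
      intro _
      omega

theorem pvMinGT_some (x : Int) (l : List Int) (m : Int) (h : pvMinGT x l = some m) :
    m ∈ l ∧ x < m ∧ ∀ y ∈ l, x < y → m ≤ y := by
  induction l generalizing m with
  | nil => simp [pvMinGT] at h
  | cons y l ih =>
    by_cases hy : x < y
    · simp only [pvMinGT, if_pos hy] at h
      cases hm : pvMinGT x l with
      | none =>
        rw [hm] at h; simp [Option.elim] at h
        subst h
        refine ⟨by simp, hy, ?_⟩
        intro z hz hxz
        rcases List.mem_cons.mp hz with rfl | hz
        · exact le_refl _
        · exact absurd hxz ((pvMinGT_none_iff x l).mp hm z hz)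
      | some m' =>
        rw [hm] at h; simp [Option.elim] at h
        obtain ⟨hm'mem, hm'gt, hm'min⟩ := ih m' hm
        subst h
        constructor
        · rcases le_total y m' with hle | hle
          · simp [min_eq_left hle]
          · simp [min_eq_right hle, hm'mem]
        · refine ⟨lt_min hy hm'gt, ?_⟩
          intro z hz hxz
          rcases List.mem_cons.mp hz with rfl | hz
          · exact min_le_left _ _
          · exact le_trans (min_le_right _ _) (hm'min z hz hxz)
    · simp only [pvMinGT, if_neg hy] at h
      obtain ⟨hmem, hgt, hmin⟩ := ih m h
      refine ⟨List.mem_cons_of_mem _ hmem, hgt, ?_⟩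
      intro z hz hxz
      rcases List.mem_cons.mp hz with rfl | hz
      · exact absurd hxz hy
      · exact hmin z hz hxz

theorem pvMinGT_eq_some (x : Int) (l : List Int) (m : Int)
    (hmem : m ∈ l) (hgt : x < m) (hmin : ∀ y ∈ l, x < y → m ≤ y) :
    pvMinGT x l = some m := by
  cases h : pvMinGT x l with
  | none => exact absurd hgt ((pvMinGT_none_iff x l).mp h m hmem)
  | some m' =>
    obtain ⟨hm'mem, hm'gt, hm'min⟩ := pvMinGT_some x l m' h
    have := le_antisymm (hm'min m hmem hgt) (hmin m' hm'mem hm'gt)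
    rw [this]

theorem pvMinGT_congr (x : Int) (l l' : List Int) (h : ∀ y, y ∈ l ↔ y ∈ l') :
    pvMinGT x l = pvMinGT x l' := by
  cases hl : pvMinGT x l with
  | none =>
    cases hl' : pvMinGT x l' with
    | none => rfl
    | some m =>
      obtain ⟨hmem, hgt, _⟩ := pvMinGT_some x l' m hl'
      exact absurd hgt ((pvMinGT_none_iff x l).mp hl m ((h m).mpr hmem))
  | some m =>
    obtain ⟨hmem, hgt, hmin⟩ := pvMinGT_some x l m hl
    exact (pvMinGT_eq_some x l' m ((h m).mp hmem) hgt
      (fun y hy hxy => hmin y ((h y).mpr hy) hxy)).symm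

-- A's inner loop over b computes exactly the abstract step
theorem foldl_pvStepA (x : Int) (l : List Int) :
    ∀ s, l.foldl (pvStepA x) s = pvApp x (pvMinGT x l) s := by
  induction l with
  | nil => intro s; rfl
  | cons y l ih =>
    intro s
    rw [List.foldl_cons, ih]
    by_cases hy : x < y
    · have hstep : pvStepA x s y = if y - x < s.1 then (y - x, x, y) else s := by
        by_cases hd : y - x < s.1 <;> simp [pvStepA, hy, hd]
      cases hm : pvMinGT x l with
      | none =>
        have hcons : pvMinGT x (y :: l) = some y := by simp [pvMinGT, hy, hm]
        rw [hcons, hstep]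
        by_cases hd : y - x < s.1 <;> simp [pvApp, hd]
      | some m =>
        have hcons : pvMinGT x (y :: l) = some (min y m) := by simp [pvMinGT, hy, hm]
        rw [hcons, hstep]
        rcases lt_trichotomy m y with h1 | h1 | h1
        · rw [min_eq_right (le_of_lt h1)]
          simp only [pvApp]
          split_ifs <;> first | rfl | omega
        · subst h1
          rw [min_self]
          simp only [pvApp]
          split_ifs <;> rfl
        · rw [min_eq_left (le_of_lt h1)]
          simp only [pvApp]
          split_ifs <;> first | rfl | omega
    · have h1 : pvMinGT x (y :: l) = pvMinGT x l := by simp [pvMinGT, hy]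
      have h2 : pvStepA x s y = s := by simp [pvStepA, hy]
      rw [h1, h2]

-- B's loop body computes the same abstract step (via bisect on the sorted copy of b)
theorem stepB_eq_pvApp (b : List Int) (x : Int) (s : Int × Int × Int) :
    (let sb := PySem.List.sorted b (fun y => y) false
     let lo := PySem.List.bisectRight sb x
     if (lo : Int) < PySem.List.len sb then
       if PySem.List.pyGetD sb (lo : Int) 0 - x < s.1 then
         (PySem.List.pyGetD sb (lo : Int) 0 - x, x, PySem.List.pyGetD sb (lo : Int) 0)
       else s
     else s) = pvApp x (pvMinGT x b) s := by
  simp only [PySem.List.len_eq, PySem.List.pyGetD_natCast, Nat.cast_lt]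
  set sb := PySem.List.sorted b (fun y => y) false with hsb
  set lo := PySem.List.bisectRight sb x with hlo
  have hpw : sb.Pairwise (· ≤ ·) := by
    have := PySem.List.sorted_pairwise b (fun y => y)
    simpa using this
  obtain ⟨hle, hbelow, habove⟩ := PySem.List.bisectRight_spec sb x hpw
  rw [← hlo] at hbelow habove
  have hmem_iff : ∀ y, y ∈ b ↔ y ∈ sb := by
    intro y; rw [hsb, PySem.List.mem_sorted]
  have hmono := List.pairwise_iff_getElem.mp hpw
  by_cases h : lo < sb.length
  · have hmin : pvMinGT x b = some sb[lo] := by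
      rw [pvMinGT_congr x b sb hmem_iff]
      apply pvMinGT_eq_some
      · exact List.getElem_mem h
      · exact habove lo h (le_refl _)
      · intro y hy hxy
        obtain ⟨k, hk, rfl⟩ := List.mem_iff_getElem.mp hy
        rcases lt_or_ge k lo with hklo | hklo
        · exact absurd hxy (not_lt.mpr (hbelow k hk hklo))
        · rcases eq_or_lt_of_le hklo with heq | hlt
          · subst heq; exact le_refl _
          · exact hmono lo k h hk hlt
    rw [hmin, if_pos h, List.getD_eq_getElem sb 0 h]
    rfl
  · have hmin : pvMinGT x b = none := by
      rw [pvMinGT_congr x b sb hmem_iff]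
      rw [pvMinGT_none_iff]
      intro y hy
      obtain ⟨k, hk, rfl⟩ := List.mem_iff_getElem.mp hy
      exact not_lt.mpr (hbelow k hk (by omega))
    rw [hmin, if_neg h]
    rfl

-- ===== VERDICT (by name: the statement is the Claim_ definition above) =====
theorem dist_between_spec : Claim_equal_dist_between := by
  intro a b pos _
  unfold Spec_dist_between
  simp only [dist_between, dist_between_alt]
  have hinner : ∀ (x : Int) (s : Int × Int × Int),
      (PySem.List.pyRange 0 (PySem.List.len b) 1).foldl (fun s k =>
        if x < PySem.List.pyGetD b k 0 ∧ PySem.List.pyGetD b k 0 - x < s.1 then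
          (PySem.List.pyGetD b k 0 - x, x, PySem.List.pyGetD b k 0)
        else s) s = pvApp x (pvMinGT x b) s := by
    intro x s
    rw [PySem.List.len_eq]
    calc _ = b.foldl (pvStepA x) s := PySem.List.foldl_pyRange_zero_pyGetD' b 0 (pvStepA x) s
      _ = _ := foldl_pvStepA x b s
  have houter :
      (PySem.List.pyRange 0 (PySem.List.len a) 1).foldl (fun s i =>
        (PySem.List.pyRange 0 (PySem.List.len b) 1).foldl (fun s k =>
          if PySem.List.pyGetD a i 0 < PySem.List.pyGetD b k 0 ∧
             PySem.List.pyGetD b k 0 - PySem.List.pyGetD a i 0 < s.1 then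
            (PySem.List.pyGetD b k 0 - PySem.List.pyGetD a i 0,
             PySem.List.pyGetD a i 0, PySem.List.pyGetD b k 0)
          else s) s) ((10000 : Int), (0 : Int), (0 : Int))
      = a.foldl (fun s x => pvApp x (pvMinGT x b) s) ((10000 : Int), (0 : Int), (0 : Int)) := by
    rw [PySem.List.len_eq a]
    calc _ = a.foldl (fun s x =>
          (PySem.List.pyRange 0 (PySem.List.len b) 1).foldl (fun s k =>
            if x < PySem.List.pyGetD b k 0 ∧ PySem.List.pyGetD b k 0 - x < s.1 then
              (PySem.List.pyGetD b k 0 - x, x, PySem.List.pyGetD b k 0)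
            else s) s) ((10000 : Int), (0 : Int), (0 : Int)) :=
        PySem.List.foldl_pyRange_zero_pyGetD' a 0 _ _
      _ = _ := by
        have hfun : (fun (s : Int × Int × Int) (x : Int) =>
            (PySem.List.pyRange 0 (PySem.List.len b) 1).foldl (fun s k =>
              if x < PySem.List.pyGetD b k 0 ∧ PySem.List.pyGetD b k 0 - x < s.1 then
                (PySem.List.pyGetD b k 0 - x, x, PySem.List.pyGetD b k 0)
              else s) s) = fun s x => pvApp x (pvMinGT x b) s :=
          funext fun s => funext fun x => hinner x s
        rw [hfun]
  have hB : (fun (s : Int × Int × Int) (x : Int) =>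
      if ((PySem.List.bisectRight (PySem.List.sorted b (fun y => y) false) x : Nat) : Int) <
          PySem.List.len (PySem.List.sorted b (fun y => y) false) then
        if PySem.List.pyGetD (PySem.List.sorted b (fun y => y) false)
            ((PySem.List.bisectRight (PySem.List.sorted b (fun y => y) false) x : Nat) : Int) 0 - x < s.1 then
          (PySem.List.pyGetD (PySem.List.sorted b (fun y => y) false)
             ((PySem.List.bisectRight (PySem.List.sorted b (fun y => y) false) x : Nat) : Int) 0 - x, x,
           PySem.List.pyGetD (PySem.List.sorted b (fun y => y) false)
             ((PySem.List.bisectRight (PySem.List.sorted b (fun y => y) false) x : Nat) : Int) 0)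
        else s
      else s) = fun s x => pvApp x (pvMinGT x b) s :=
    funext fun s => funext fun x => stepB_eq_pvApp b x s
  rw [houter, hB]
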